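-- pv_equiv track=rewrite | github.com/egitimplus/python-academy | exercises/string/count.py | multiply_vowels
-- ===== SOURCE A (Python) =====
-- def multiply_vowels(text):
--     vowels = "AaEeIiOoUu"
--     words = text.split()
--
--     vowel_multiply = 1
--     for word in words:
--         vowel_count = 0
--         for letter in word:
--             if letter in vowels:
--                 vowel_count += 1
--         if vowel_count > 0:
--             vowel_multiply *= vowel_count
--
--     return vowel_multiply
-- ===== SOURCE B (Python) =====
-- def multiply_vowels(text):
--     vowels = "AaEeIiOoUu"
--     product = 1
--     count = 0
--     for ch in text:
--         if ch.isspace():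
--             if count > 0:
--                 product *= count
--             count = 0
--         elif ch in vowels:
--             count += 1
--     if count > 0:
--         product *= count
--     return product
-- ===== Notes on version B (the rewrite author's own statement) =====
-- stated objective: alternative
-- what changed: Replaces text.split() plus a nested per-word counting loop by a single streaming pass over the characters that keeps a running product and the current word's vowel count, folding the count into the product at each whitespace boundary and once at the end.
import Mathlib
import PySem

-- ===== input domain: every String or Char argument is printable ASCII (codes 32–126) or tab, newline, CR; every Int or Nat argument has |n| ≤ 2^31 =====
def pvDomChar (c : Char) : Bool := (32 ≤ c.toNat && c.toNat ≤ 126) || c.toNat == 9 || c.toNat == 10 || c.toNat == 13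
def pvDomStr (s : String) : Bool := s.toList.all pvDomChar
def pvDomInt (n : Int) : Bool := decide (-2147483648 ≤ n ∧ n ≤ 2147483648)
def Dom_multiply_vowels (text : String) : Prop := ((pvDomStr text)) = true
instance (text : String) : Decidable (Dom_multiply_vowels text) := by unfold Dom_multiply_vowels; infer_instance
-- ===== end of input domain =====

-- B replaces split-then-nested-count by a single streaming pass over the characters
-- that multiplies in each word's vowel count at word boundaries (objective: alternative).


-- ===== PORT A =====
def multiply_vowels (text : String) : Int :=
  let vowels := "AaEeIiOoUu"
  let words := PySem.Str.split₀ text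
  words.foldl (fun vowel_multiply word =>
    let vowel_count : Int :=
      word.toList.foldl (fun vowel_count letter =>
        if PySem.Str.isIn (String.ofList [letter]) vowels then vowel_count + 1 else vowel_count) 0
    if vowel_count > 0 then vowel_multiply * vowel_count else vowel_multiply) 1

-- ===== PORT B =====
def multiply_vowels_alt (text : String) : Int :=
  let vowels := "AaEeIiOoUu"
  let st := text.toList.foldl (fun (st : Int × Int) ch =>
      if PySem.Chars.isspace ch then
        (if st.2 > 0 then st.1 * st.2 else st.1, 0)
      else if PySem.Str.isIn (String.ofList [ch]) vowels then (st.1, st.2 + 1)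
      else st) ((1 : Int), (0 : Int))
  if st.2 > 0 then st.1 * st.2 else st.1

-- ===== PRECONDITION & SPEC =====
def Spec_multiply_vowels (text : String) (out : Int) : Prop := out = multiply_vowels_alt text
instance (text : String) (out : Int) : Decidable (Spec_multiply_vowels text out) := by unfold Spec_multiply_vowels; infer_instance

-- ===== CLAIM (what is proved, stated in full; the proofs are below) =====
def Claim_equal_multiply_vowels : Prop := ∀ (text : String), Dom_multiply_vowels text → Spec_multiply_vowels text (multiply_vowels text)

-- ===== LEMMAS AND PROOFS =====
def pvMem (c : Char) : Bool := PySem.Str.isIn (String.ofList [c]) "AaEeIiOoUu"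

def pvStep (st : Int × Int) (c : Char) : Int × Int :=
  if PySem.Chars.isspace c then (if st.2 > 0 then st.1 * st.2 else st.1, 0)
  else if pvMem c then (st.1, st.2 + 1) else st

def pvA (ws : List (List Char)) (p : Int) : Int :=
  ws.foldl (fun vm w =>
    let n : Int := w.foldl (fun n c => if pvMem c then n + 1 else n) 0
    if n > 0 then vm * n else vm) p

-- the inner count is a countP
theorem pvVC_eq (w : List Char) :
    w.foldl (fun n c => if pvMem c then n + 1 else n) (0 : Int) = (w.countP pvMem : Int) := by
  simpa using PySem.List.foldl_if_add_one pvMem w 0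

theorem go_acc (cs cur acc) :
    PySem.Chars.split₀.go cs cur acc = acc.reverse ++ PySem.Chars.split₀.go cs cur [] := by
  induction cs generalizing cur acc with
  | nil => by_cases h : cur.isEmpty <;> simp [PySem.Chars.split₀.go, h]
  | cons c rest ih =>
    by_cases hs : PySem.Chars.isspace c <;> by_cases h : cur.isEmpty <;>
      simp only [PySem.Chars.split₀.go, hs, h, if_true, if_false, Bool.false_eq_true,
        reduceIte]
    · exact ih _ _
    · rw [ih [] (cur.reverse :: acc), ih [] [cur.reverse]]
      simp only [List.reverse_cons, List.reverse_singleton, List.append_assoc,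
        List.reverse_nil, List.nil_append]
    · exact ih _ _
    · exact ih _ _

theorem pvA_append (ws ws' : List (List Char)) (p : Int) :
    pvA (ws ++ ws') p = pvA ws' (pvA ws p) := by
  simp only [pvA, List.foldl_append]


theorem pvA_singleton (w : List Char) (p : Int) :
    pvA [w] p = if (w.countP pvMem : Int) > 0 then p * (w.countP pvMem : Int) else p := by
  simp only [pvA, List.foldl_cons, List.foldl_nil, pvVC_eq]

theorem main_lemma (cs : List Char) (cur : List Char) (p : Int) :
    (let st := cs.foldl pvStep (p, (cur.countP pvMem : Int));
     if st.2 > 0 then st.1 * st.2 else st.1)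
    = pvA (PySem.Chars.split₀.go cs cur []) p := by
  induction cs generalizing cur p with
  | nil =>
    by_cases h : cur.isEmpty
    · have : cur = [] := List.isEmpty_iff.mp h
      subst this
      simp [PySem.Chars.split₀.go, pvA]
    · simp only [PySem.Chars.split₀.go, h, Bool.false_eq_true, reduceIte, List.reverse_nil,
        List.nil_append, List.foldl_nil]
      rw [List.reverse_singleton, pvA_singleton, List.countP_reverse]
  | cons c rest ih =>
    by_cases hs : PySem.Chars.isspace c
    · by_cases h : cur.isEmpty
      · have : cur = [] := List.isEmpty_iff.mp h
        subst this
        simp only [PySem.Chars.split₀.go, hs, if_true, List.isEmpty_nil, List.foldl_cons]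
        have hstep : pvStep (p, ((List.countP pvMem [] : Nat) : Int)) c = (p, ((List.countP pvMem [] : Nat) : Int)) := by
          simp only [pvStep, hs, if_true, List.countP_nil, Nat.cast_zero]
          rfl
        rw [hstep]
        exact ih [] p
      · simp only [PySem.Chars.split₀.go, hs, if_true, h, Bool.false_eq_true, reduceIte,
          List.foldl_cons]
        rw [go_acc rest [] [cur.reverse], List.reverse_singleton, pvA_append, pvA_singleton,
          List.countP_reverse]
        have hstep : pvStep (p, (cur.countP pvMem : Int)) c
            = (if (cur.countP pvMem : Int) > 0 then p * (cur.countP pvMem : Int) else p, ((List.countP pvMem [] : Nat) : Int)) := by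
          simp only [pvStep, hs, if_true, List.countP_nil, Nat.cast_zero]
        rw [hstep]
        exact ih [] _
    · simp only [PySem.Chars.split₀.go, hs, Bool.false_eq_true, reduceIte, List.foldl_cons]
      have hstep : pvStep (p, (cur.countP pvMem : Int)) c = (p, ((c :: cur).countP pvMem : Int)) := by
        by_cases hm : pvMem c
        · simp only [pvStep, hs, hm, Bool.false_eq_true, reduceIte, List.countP_cons, if_true,
            Prod.mk.injEq]
          push_cast
          exact ⟨trivial, rfl⟩
        · simp only [pvStep, hs, hm, Bool.false_eq_true, reduceIte, List.countP_cons, if_false,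
            Nat.add_zero]
      rw [hstep]
      exact ih (c :: cur) p

-- ===== VERDICT (by name: the statement is the Claim_ definition above) =====
theorem multiply_vowels_spec : Claim_equal_multiply_vowels := by
  intro text _
  unfold Spec_multiply_vowels
  have hA : multiply_vowels text = pvA (PySem.Chars.split₀ text.toList) 1 := by
    simp only [multiply_vowels, PySem.Str.split₀, List.foldl_map, pvA, pvMem,
      String.toList_ofList]
    rfl
  have hB : multiply_vowels_alt text
      = (let st := text.toList.foldl pvStep (1, ((List.countP pvMem [] : Nat) : Int));
         if st.2 > 0 then st.1 * st.2 else st.1) := by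
    simp only [multiply_vowels_alt, pvStep, pvMem, List.countP_nil, Nat.cast_zero]
    rfl
  rw [hA, hB, main_lemma text.toList [] 1, PySem.Chars.split₀]
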